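-- pv_equiv track=rewrite | github.com/GitBib/pyasstosrt | pyasstosrt/pyasstosrt.py | merged_dialogues
-- ===== SOURCE A (Python) =====
-- from typing import Any, Generator, List, Optional, Tuple, Union
--
-- def merged_dialogues(
--     dialogues: List[Tuple[str, str, str]],
-- ) -> Generator[Union[Tuple[str, str, str], Tuple[Any, str, str]], Any, None]:
--     """
--     Group consecutive dialogues with the same text into a single dialogue with a merged time range.
--
--     :param dialogues: List of dialogue tuples (start_time, end_time, text)
--     :type dialogues: List[Tuple[str, str, str]]
--     :return: Generator yielding merged dialogues
--     :rtype: List[Tuple[str, str, str]]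
--     """
--     curr_dialogue = None
--     for start, end, text in dialogues:
--         if curr_dialogue is None:
--             curr_dialogue = (start, end, text)
--         elif text == curr_dialogue[2]:
--             curr_dialogue = (curr_dialogue[0], end, text)
--         else:
--             yield curr_dialogue
--             curr_dialogue = (start, end, text)
--     if curr_dialogue is not None:
--         yield curr_dialogue
-- ===== SOURCE B (Python) =====
-- from itertools import groupby
--
-- def merged_dialogues(dialogues):
--     """
--     Group consecutive dialogues with the same text into a single dialogue with a merged time range.
--     """
--     for text, group in groupby(dialogues, key=lambda d: d[2]):
--         items = [(start, end, t) for start, end, t in group]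
--         yield (items[0][0], items[-1][1], text)
-- ===== Notes on version B (the rewrite author's own statement) =====
-- stated objective: idiomatic
-- what changed: Replaced the carry/flush state machine over an Optional current tuple with itertools.groupby keyed on the text field: each consecutive run is materialized and reduced to (first start, last end, text).
import Mathlib
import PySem

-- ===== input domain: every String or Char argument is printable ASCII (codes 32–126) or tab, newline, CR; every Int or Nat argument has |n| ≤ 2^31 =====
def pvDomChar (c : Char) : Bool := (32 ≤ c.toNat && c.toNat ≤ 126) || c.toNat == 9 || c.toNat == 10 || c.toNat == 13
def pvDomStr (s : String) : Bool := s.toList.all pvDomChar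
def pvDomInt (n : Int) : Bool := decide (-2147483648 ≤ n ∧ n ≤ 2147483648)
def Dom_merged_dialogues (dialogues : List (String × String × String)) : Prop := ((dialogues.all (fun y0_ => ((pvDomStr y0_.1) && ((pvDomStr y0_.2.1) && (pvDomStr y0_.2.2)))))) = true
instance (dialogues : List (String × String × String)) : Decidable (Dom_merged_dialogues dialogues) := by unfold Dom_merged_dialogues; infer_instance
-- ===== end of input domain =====

-- B replaces A's carry/flush state machine with a groupby-then-reduce pass (idiomatic); same values.

-- ===== PORT A =====
-- A: fold over the dialogues carrying (yielded-so-far, optional current dialogue); final flush of the carry.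
def merged_dialogues (dialogues : List (String × String × String)) : List (String × String × String) :=
  let p := dialogues.foldl
    (fun (p : List (String × String × String) × Option (String × String × String)) d =>
      let start := d.1; let end_ := d.2.1; let text := d.2.2
      match p.2 with
      | none => (p.1, some (start, end_, text))
      | some c =>
        if text == c.2.2 then (p.1, some (c.1, end_, text))
        else (p.1 ++ [c], some (start, end_, text)))
    ([], none)
  match p.2 with
  | none => p.1
  | some c => p.1 ++ [c]

-- ===== PORT B =====
-- hand port of itertools.groupby's splitting of the leading run with key d[2] == t
def pvGroupSpan (t : String) : List (String × String × String) → List (String × String × String) × List (String × String × String)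
  | [] => ([], [])
  | x :: xs =>
    if x.2.2 == t then
      let gr := pvGroupSpan t xs
      (x :: gr.1, gr.2)
    else ([], x :: xs)

theorem pvGroupSpan_len (t : String) (xs : List (String × String × String)) :
    (pvGroupSpan t xs).2.length ≤ xs.length := by
  induction xs with
  | nil => simp [pvGroupSpan]
  | cons x xs ih =>
    simp only [pvGroupSpan]
    split
    · simpa using Nat.le_succ_of_le ih
    · simp

-- B: for each consecutive group (keyed by text), yield (first start, last end, text).
def merged_dialogues_alt (dialogues : List (String × String × String)) : List (String × String × String) :=
  match dialogues with
  | [] => []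
  | x :: xs =>
    let gr := pvGroupSpan x.2.2 xs
    -- items = x :: gr.1; items[0][0] = x.1, items[-1][1] = (gr.1.getLastD x).2.1
    (x.1, (gr.1.getLastD x).2.1, x.2.2) :: merged_dialogues_alt gr.2
termination_by dialogues.length
decreasing_by
  have := pvGroupSpan_len x.2.2 xs; simp; omega

-- ===== PRECONDITION & SPEC =====
def Spec_merged_dialogues (dialogues : List (String × String × String)) (out : List (String × String × String)) : Prop := out = merged_dialogues_alt dialogues
instance (dialogues : List (String × String × String)) (out : List (String × String × String)) : Decidable (Spec_merged_dialogues dialogues out) := by unfold Spec_merged_dialogues; infer_instance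

-- ===== CLAIM (what is proved, stated in full; the proofs are below) =====
def Claim_equal_merged_dialogues : Prop := ∀ (dialogues : List (String × String × String)), Dom_merged_dialogues dialogues → Spec_merged_dialogues dialogues (merged_dialogues dialogues)

-- ===== LEMMAS AND PROOFS =====

-- A's loop body, named for the lemmas
def pvStepA (p : List (String × String × String) × Option (String × String × String))
    (d : String × String × String) : List (String × String × String) × Option (String × String × String) :=
  let start := d.1; let end_ := d.2.1; let text := d.2.2
  match p.2 with
  | none => (p.1, some (start, end_, text))
  | some c =>
    if text == c.2.2 then (p.1, some (c.1, end_, text))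
    else (p.1 ++ [c], some (start, end_, text))

theorem pvStepA_eq (ds : List (String × String × String)) (p) :
    ds.foldl
      (fun (p : List (String × String × String) × Option (String × String × String)) d =>
        let start := d.1; let end_ := d.2.1; let text := d.2.2
        match p.2 with
        | none => (p.1, some (start, end_, text))
        | some c =>
          if text == c.2.2 then (p.1, some (c.1, end_, text))
          else (p.1 ++ [c], some (start, end_, text))) p
    = ds.foldl pvStepA p := rfl

-- the accumulator only ever grows by appending on the right
theorem pvLoop_acc (ds : List (String × String × String)) :
    ∀ (acc : List (String × String × String)) (c : Option (String × String × String)),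
      ds.foldl pvStepA (acc, c) = (acc ++ (ds.foldl pvStepA ([], c)).1, (ds.foldl pvStepA ([], c)).2) := by
  induction ds with
  | nil => intro acc c; simp
  | cons d ds ih =>
    intro acc c
    cases c with
    | none =>
      simp only [List.foldl_cons, pvStepA]
      exact ih acc _
    | some c =>
      simp only [List.foldl_cons, pvStepA]
      by_cases h : d.2.2 == c.2.2
      · simp only [h, if_true]; exact ih acc _
      · simp only [h, Bool.false_eq_true, if_false, List.nil_append]
        rw [ih (acc ++ [c]), ih [c]]
        simp

-- finish A's loop from state (acc, c)
def pvFinishA (p : List (String × String × String) × Option (String × String × String)) :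
    List (String × String × String) :=
  match p.2 with
  | none => p.1
  | some c => p.1 ++ [c]

theorem pvGetLastD_snd (g : List (String × String × String)) (a b : String × String × String)
    (h : a.2.1 = b.2.1) : (g.getLastD a).2.1 = (g.getLastD b).2.1 := by
  cases g with
  | nil => simpa using h
  | cons x xs =>
    simp only [List.getLastD_eq_getLast?]
    cases hx : (x :: xs).getLast? with
    | none => simp at hx
    | some y => simp

-- key lemma: A's loop started with carry (s,e,t) produces the merged head of the run, then recurses on the rest
theorem pvRun (n : ℕ) :
    (∀ ds : List (String × String × String), ds.length ≤ n → ∀ s e t,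
      pvFinishA (ds.foldl pvStepA ([], some (s, e, t))) =
        (s, ((pvGroupSpan t ds).1.getLastD (s, e, t)).2.1, t) ::
          merged_dialogues_alt (pvGroupSpan t ds).2) ∧
    (∀ ds : List (String × String × String), ds.length ≤ n →
      pvFinishA (ds.foldl pvStepA ([], none)) = merged_dialogues_alt ds) := by
  induction n with
  | zero =>
    constructor
    · intro ds h s e t
      have : ds = [] := List.eq_nil_of_length_eq_zero (Nat.le_zero.mp h)
      subst this
      simp [pvFinishA, pvGroupSpan, merged_dialogues_alt]
    · intro ds h
      have : ds = [] := List.eq_nil_of_length_eq_zero (Nat.le_zero.mp h)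
      subst this
      simp [pvFinishA, merged_dialogues_alt]
  | succ n ih =>
    have main : ∀ ds : List (String × String × String), ds.length ≤ n + 1 → ∀ s e t,
      pvFinishA (ds.foldl pvStepA ([], some (s, e, t))) =
        (s, ((pvGroupSpan t ds).1.getLastD (s, e, t)).2.1, t) ::
          merged_dialogues_alt (pvGroupSpan t ds).2 := by
      intro ds h s e t
      cases ds with
      | nil => simp [pvFinishA, pvGroupSpan, merged_dialogues_alt]
      | cons x xs =>
        have hx : xs.length ≤ n := by simpa using h
        by_cases hxt : x.2.2 == t
        · -- x joins the current run
          have ht : x.2.2 = t := beq_iff_eq.mp hxt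
          subst ht
          simp only [List.foldl_cons, pvStepA, beq_self_eq_true, if_true]
          rw [ih.1 xs hx s x.2.1 x.2.2]
          simp only [pvGroupSpan, beq_self_eq_true, if_true]
          rw [List.getLastD_cons,
            pvGetLastD_snd (pvGroupSpan x.2.2 xs).1 (s, x.2.1, x.2.2) x rfl]
        · -- flush (s,e,t), start a new run at x
          simp only [List.foldl_cons, pvStepA, hxt, Bool.false_eq_true, if_false,
            List.nil_append]
          rw [pvLoop_acc xs [(s, e, t)] (some (x.1, x.2.1, x.2.2))]
          have : pvFinishA ((s, e, t) :: (xs.foldl pvStepA ([], some (x.1, x.2.1, x.2.2))).1,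
              (xs.foldl pvStepA ([], some (x.1, x.2.1, x.2.2))).2)
              = (s, e, t) :: pvFinishA (xs.foldl pvStepA ([], some (x.1, x.2.1, x.2.2))) := by
            unfold pvFinishA
            cases (xs.foldl pvStepA ([], some (x.1, x.2.1, x.2.2))).2 <;> simp
          simp only [List.singleton_append]
          rw [this, ih.1 xs hx x.1 x.2.1 x.2.2]
          simp only [pvGroupSpan, hxt, Bool.false_eq_true, if_false]
          rw [merged_dialogues_alt]
          simp only [List.getLastD_nil]
    refine ⟨main, ?_⟩
    intro ds h
    cases ds with
    | nil => simp [pvFinishA, merged_dialogues_alt]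
    | cons x xs =>
      have hx : xs.length ≤ n + 1 := by simp at h; omega
      simp only [List.foldl_cons, pvStepA]
      rw [main xs hx x.1 x.2.1 x.2.2, merged_dialogues_alt]

theorem merged_eq (ds : List (String × String × String)) :
    merged_dialogues ds = merged_dialogues_alt ds := by
  have := (pvRun ds.length).2 ds le_rfl
  unfold merged_dialogues
  rw [pvStepA_eq]
  unfold pvFinishA at this
  exact this

-- ===== VERDICT (by name: the statement is the Claim_ definition above) =====
theorem merged_dialogues_spec : Claim_equal_merged_dialogues := by
  intro ds _
  unfold Spec_merged_dialogues
  exact merged_eq ds
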